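-- pv_equiv track=rewrite | github.com/yoonseopkim/baekjoonPractice | 프로그래머스/2/138476. 귤 고르기/귤 고르기.py | solution
-- ===== SOURCE A (Python) =====
-- from collections import Counter
--
-- def solution(k, tangerine):
--     counter = Counter(tangerine)
--     sorted_counter = sorted(counter.values(), reverse = True)
--     answer = 0
--     sum_cnt = 0
--     for cnt in sorted_counter:
--
--         sum_cnt += cnt
--         answer += 1
--         if sum_cnt >=k:
--             break
--     return answer
-- ===== SOURCE B (Python) =====
-- from collections import Counter
--
-- def solution(k, tangerine):
--     counter = Counter(tangerine)
--     freq = Counter(counter.values())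
--     answer = 0
--     total = 0
--     for c in range(max(freq, default=0), 0, -1):
--         for _ in range(freq.get(c, 0)):
--             total += c
--             answer += 1
--             if total >= k:
--                 return answer
--     return answer
-- ===== Notes on version B (the rewrite author's own statement) =====
-- stated objective: alternative
-- what changed: Replaces sorting the counter values by a second frequency table (Counter of the counts) traversed from the maximum count value downwards, consuming kinds bucket by bucket with the same greedy early stop.
import Mathlib
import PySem

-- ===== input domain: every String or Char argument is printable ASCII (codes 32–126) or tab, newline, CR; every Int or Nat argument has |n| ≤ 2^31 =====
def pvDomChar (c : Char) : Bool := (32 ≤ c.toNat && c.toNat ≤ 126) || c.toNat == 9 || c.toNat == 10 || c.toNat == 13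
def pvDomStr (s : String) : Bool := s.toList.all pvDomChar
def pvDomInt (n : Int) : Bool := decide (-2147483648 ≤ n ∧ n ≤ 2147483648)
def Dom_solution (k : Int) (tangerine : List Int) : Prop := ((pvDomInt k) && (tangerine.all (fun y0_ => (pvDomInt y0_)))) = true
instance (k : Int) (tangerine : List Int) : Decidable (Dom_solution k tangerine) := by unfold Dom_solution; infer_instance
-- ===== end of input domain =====

-- B replaces the sort of the counter values by a second frequency table (Counter of the
-- counts) traversed from the maximum count value downwards (alternative algorithm).

-- ===== PORT A =====
-- A's for-loop with break: sum_cnt += cnt; answer += 1; if sum_cnt >= k: break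
def goA (k : Int) : List Int → Int → Int → Int
  | [], answer, _ => answer
  | cnt :: rest, answer, sum_cnt =>
    if sum_cnt + cnt ≥ k then answer + 1
    else goA k rest (answer + 1) (sum_cnt + cnt)

def solution (k : Int) (tangerine : List Int) : Int :=
  let counter := PySem.Dict.counter (κ := Int) tangerine
  let sorted_counter := PySem.List.sorted counter.values (fun x => x) true
  goA k sorted_counter 0 0

-- ===== PORT B =====
-- inner loop 'for _ in range(freq.get(c, 0))'; .inl = early return of the answer
def innerB (k c : Int) : Nat → Int → Int → Sum Int (Int × Int)
  | 0, answer, total => .inr (answer, total)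
  | n + 1, answer, total =>
    if total + c ≥ k then .inl (answer + 1)
    else innerB k c n (answer + 1) (total + c)

-- outer loop 'for c in range(max(freq, default=0), 0, -1)'
def outerB (k : Int) (freq : PySem.Dict Int Int) : List Int → Int → Int → Int
  | [], answer, _ => answer
  | c :: cs, answer, total =>
    match innerB k c (freq.getD c 0).toNat answer total with
    | .inl a => a
    | .inr (a, t) => outerB k freq cs a t

def solution_alt (k : Int) (tangerine : List Int) : Int :=
  let counter := PySem.Dict.counter (κ := Int) tangerine
  let freq := PySem.Dict.counter (κ := Int) counter.values
  outerB k freq (PySem.List.pyRange (PySem.List.maxD freq.keys (fun x => x) 0) 0 (-1)) 0 0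

-- ===== PRECONDITION & SPEC =====
def Spec_solution (k : Int) (tangerine : List Int) (out : Int) : Prop := out = solution_alt k tangerine
instance (k : Int) (tangerine : List Int) (out : Int) : Decidable (Spec_solution k tangerine out) := by unfold Spec_solution; infer_instance

-- ===== CLAIM (what is proved, stated in full; the proofs are below) =====
def Claim_equal_solution : Prop := ∀ (k : Int) (tangerine : List Int), Dom_solution k tangerine → Spec_solution k tangerine (solution k tangerine)

-- ===== LEMMAS AND PROOFS =====

-- consuming one bucket of n kinds of count c is goA on n copies of c
theorem innerB_goA (k c : Int) (n : Nat) (ans tot : Int) (rest : List Int) :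
    goA k (List.replicate n c ++ rest) ans tot =
      (match innerB k c n ans tot with
        | .inl a => a
        | .inr (a, t) => goA k rest a t) := by
  induction n generalizing ans tot with
  | zero => simp [innerB]
  | succ m ih =>
    simp only [List.replicate_succ, List.cons_append, goA, innerB]
    split_ifs with h
    · rfl
    · exact ih _ _

-- B's double loop is A's loop on the buckets flattened into copies
theorem outerB_goA (k : Int) (freq : PySem.Dict Int Int) (cs : List Int) (ans tot : Int) :
    outerB k freq cs ans tot =
      goA k (cs.flatMap (fun c => List.replicate (freq.getD c 0).toNat c)) ans tot := by
  induction cs generalizing ans tot with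
  | nil => simp [outerB, goA]
  | cons c cs ih =>
    simp only [List.flatMap_cons, outerB, innerB_goA]
    cases h : innerB k c (freq.getD c 0).toNat ans tot with
    | inl a => rfl
    | inr p => exact ih _ _

theorem pyRange_neg_one (M : Int) (h : 0 ≤ M) :
    PySem.List.pyRange M 0 (-1) = (List.range M.toNat).map (fun j : Nat => M - (j : Int)) := by
  simp only [PySem.List.pyRange]
  rcases lt_or_eq_of_le h with h' | h'
  · norm_num [if_pos h']
    exact fun a _ => by ring
  · simp [← h']

-- counting in a flatten of replicates over a Nodup index list
theorem count_flatMap_replicate (l : List Int) (m : Int → Nat) (hnd : l.Nodup) (a : Int) :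
    (l.flatMap (fun c => List.replicate (m c) c)).count a = if a ∈ l then m a else 0 := by
  induction l with
  | nil => simp
  | cons c cs ih =>
    simp only [List.flatMap_cons, List.count_append, List.count_replicate,
      ih (List.nodup_cons.mp hnd).2, List.mem_cons]
    rcases List.nodup_cons.mp hnd with ⟨hc, _⟩
    by_cases hac : a = c
    · subst hac; simp [hc]
    · have hca : (c == a) = false := by
        simp only [beq_eq_false_iff_ne, ne_eq]
        exact fun h => hac h.symm
      simp [hca, hac]

-- descending index list × equal-valued buckets gives a descending flatten
theorem pairwise_flatMap_replicate (l : List Int) (m : Int → Nat)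
    (hp : l.Pairwise (fun a b => b < a)) :
    (l.flatMap (fun c => List.replicate (m c) c)).Pairwise (fun a b : Int => b ≤ a) := by
  induction l with
  | nil => simp
  | cons c cs ih =>
    rcases List.pairwise_cons.mp hp with ⟨hc, hcs⟩
    simp only [List.flatMap_cons]
    rw [List.pairwise_append]
    refine ⟨List.pairwise_replicate.mpr (Or.inr le_rfl), ih hcs, ?_⟩
    intro x hx y hy
    rcases List.eq_of_mem_replicate hx with rfl
    rcases List.mem_flatMap.mp hy with ⟨d, hd, hyd⟩
    rcases List.eq_of_mem_replicate hyd with rfl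
    exact le_of_lt (hc _ hd)

-- the values of Counter(xs) are the positive multiplicities of xs
theorem mem_values_counter {v : Int} (xs : List Int)
    (hv : v ∈ (PySem.Dict.counter (κ := Int) xs).values) :
    1 ≤ v ∧ ∃ t ∈ xs, v = (xs.count t : Int) := by
  have hvals : (PySem.Dict.counter (κ := Int) xs).values
      = ((PySem.Set.ofList xs).map (fun t => (t, (xs.count t : Int)))).map (·.2) := by
    simp only [PySem.Dict.values, PySem.Dict.items_counter]
  rw [hvals] at hv
  simp only [List.map_map, List.mem_map, Function.comp] at hv
  rcases hv with ⟨t, ht, rfl⟩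
  have htx : t ∈ xs := (PySem.Set.mem_ofList xs t).mp ht
  have : 1 ≤ xs.count t := List.count_pos_iff.mpr htx
  exact ⟨by exact_mod_cast this, t, htx, rfl⟩

-- the flattened bucket traversal is exactly the reverse-sorted value list
theorem sorted_eq_desc (vals : List Int) (hpos : ∀ v ∈ vals, 1 ≤ v) :
    PySem.List.sorted vals (fun x => x) true =
      (PySem.List.pyRange (PySem.List.maxD (PySem.Dict.counter (κ := Int) vals).keys (fun x => x) 0) 0 (-1)).flatMap
        (fun c => List.replicate ((PySem.Dict.counter (κ := Int) vals).getD c 0).toNat c) := by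
  set M := PySem.List.maxD (PySem.Dict.counter (κ := Int) vals).keys (fun x => x) 0 with hMdef
  have hub : ∀ v ∈ vals, v ≤ M := by
    intro v hv
    have hvk : v ∈ (PySem.Dict.counter (κ := Int) vals).keys := by
      rw [PySem.Dict.keys_counter vals]
      exact (PySem.Set.mem_ofList vals v).mpr hv
    have hne : (PySem.Dict.counter (κ := Int) vals).keys ≠ [] := by
      intro h; rw [h] at hvk; exact absurd hvk (List.not_mem_nil)
    rcases Option.ne_none_iff_exists'.mp
        (fun h => hne ((PySem.List.max?_eq_none_iff
          ((PySem.Dict.counter (κ := Int) vals).keys) (fun x : Int => x)).mp h)) with ⟨m, hm⟩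
    have hmM : M = m := by rw [hMdef]; simp only [PySem.List.maxD, hm, Option.getD_some]
    rw [hmM]
    exact PySem.List.max?_isMax hm v hvk
  have hM0 : 0 ≤ M := by
    cases h : (PySem.Dict.counter (κ := Int) vals).keys with
    | nil =>
      have h2 : PySem.Set.ofList vals = [] := by rw [← PySem.Dict.keys_counter vals]; exact h
      simp [hMdef, PySem.List.maxD, (PySem.List.max?_eq_none_iff
        (PySem.Set.ofList vals) (fun x : Int => x)).mpr h2]
    | cons x t =>
      have hne : (PySem.Dict.counter (κ := Int) vals).keys ≠ [] := by rw [h]; simp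
      rcases Option.ne_none_iff_exists'.mp
          (fun hq => hne ((PySem.List.max?_eq_none_iff
            ((PySem.Dict.counter (κ := Int) vals).keys) (fun x : Int => x)).mp hq)) with ⟨m, hm⟩
      have hmM : M = m := by rw [hMdef]; simp only [PySem.List.maxD, hm, Option.getD_some]
      have hmmem : m ∈ (PySem.Dict.counter (κ := Int) vals).keys := PySem.List.max?_mem hm
      rw [PySem.Dict.keys_counter vals] at hmmem
      have hmv : m ∈ vals := (PySem.Set.mem_ofList vals m).mp hmmem
      have := hpos m hmv
      omega
  rw [pyRange_neg_one M hM0]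
  have hcnt : ∀ c : Int, ((PySem.Dict.counter (κ := Int) vals).getD c 0).toNat = vals.count c := by
    intro c
    rw [PySem.Dict.getD_counter]
    exact Int.toNat_natCast _
  have hRdesc : ((List.range M.toNat).map (fun j : Nat => M - (j : Int))).Pairwise
      (fun a b : Int => b < a) :=
    List.Pairwise.map _ (fun i j (hij : i < j) => by omega) (List.pairwise_lt_range)
  have hRnd : ((List.range M.toNat).map (fun j : Nat => M - (j : Int))).Nodup :=
    hRdesc.imp (fun h => (ne_of_lt h).symm)
  have hRmem : ∀ a : Int, a ∈ (List.range M.toNat).map (fun j : Nat => M - (j : Int)) ↔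
      1 ≤ a ∧ a ≤ M := by
    intro a
    simp only [List.mem_map, List.mem_range]
    constructor
    · rintro ⟨j, hj, rfl⟩; omega
    · rintro ⟨h1, h2⟩; exact ⟨(M - a).toNat, by omega, by omega⟩
  have hperm : (((List.range M.toNat).map (fun j : Nat => M - (j : Int))).flatMap
      (fun c => List.replicate ((PySem.Dict.counter (κ := Int) vals).getD c 0).toNat c)).Perm vals := by
    rw [List.perm_iff_count]
    intro a
    rw [count_flatMap_replicate ((List.range M.toNat).map (fun j : Nat => M - (j : Int)))
      (fun c => ((PySem.Dict.counter (κ := Int) vals).getD c 0).toNat) hRnd a]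
    by_cases ha : a ∈ (List.range M.toNat).map (fun j : Nat => M - (j : Int))
    · rw [if_pos ha, hcnt a]
    · have hav : a ∉ vals := fun hv => ha ((hRmem a).mpr ⟨hpos a hv, hub a hv⟩)
      rw [if_neg ha, List.count_eq_zero_of_not_mem hav]
  have hs1 : (PySem.List.sorted vals (fun x => x) true).Pairwise (fun a b : Int => b ≤ a) :=
    PySem.List.sorted_pairwise_rev vals (fun x => x)
  have hs2 := pairwise_flatMap_replicate _
    (fun c => ((PySem.Dict.counter (κ := Int) vals).getD c 0).toNat) hRdesc
  have hp : (PySem.List.sorted vals (fun x => x) true).Perm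
      (((List.range M.toNat).map (fun j : Nat => M - (j : Int))).flatMap
        (fun c => List.replicate ((PySem.Dict.counter (κ := Int) vals).getD c 0).toNat c)) :=
    (PySem.List.sorted_perm vals (fun x => x) true).trans hperm.symm
  exact List.Perm.eq_of_pairwise
    (fun a b _ _ h1 h2 => le_antisymm h2 h1) hs1 hs2 hp

-- ===== VERDICT (by name: the statement is the Claim_ definition above) =====
theorem solution_spec : Claim_equal_solution := by
  intro k tangerine _
  show solution k tangerine = solution_alt k tangerine
  simp only [solution, solution_alt]
  rw [outerB_goA, ← sorted_eq_desc _ (fun v hv => (mem_values_counter tangerine hv).1)]
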